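-- pv_equiv track=rewrite | github.com/itsXactlY/neural-memory | benchmarks/neural_memory_benchmark/suites/dream_derived_fact.py | _both_tokens_present
-- ===== SOURCE A (Python) =====
-- from typing import Any, Dict, List, Optional, Tuple
--
-- def _both_tokens_present(results: List[Dict[str, Any]], a_tok: str, b_tok: str) -> bool:
--     """True if the top-k results collectively contain both tokens."""
--     al = a_tok.lower()
--     bl = b_tok.lower()
--     saw_a = saw_b = False
--     for r in results:
--         c = (r.get("content") or "").lower()
--         if al in c:
--             saw_a = True
--         if bl in c:
--             saw_b = True
--         if saw_a and saw_b:
--             return True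
--     return False
-- ===== SOURCE B (Python) =====
-- from typing import Any, Dict, List
--
-- def _both_tokens_present(results: List[Dict[str, Any]], a_tok: str, b_tok: str) -> bool:
--     """True if the top-k results collectively contain both tokens."""
--     al = a_tok.lower()
--     bl = b_tok.lower()
--     return (any(al in (r.get("content") or "").lower() for r in results)
--             and any(bl in (r.get("content") or "").lower() for r in results))
-- ===== Notes on version B (the rewrite author's own statement) =====
-- stated objective: simpler
-- what changed: Replaced the single interleaved loop carrying (saw_a, saw_b) state with two independent any() presence scans combined with 'and'.
import Mathlib
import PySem

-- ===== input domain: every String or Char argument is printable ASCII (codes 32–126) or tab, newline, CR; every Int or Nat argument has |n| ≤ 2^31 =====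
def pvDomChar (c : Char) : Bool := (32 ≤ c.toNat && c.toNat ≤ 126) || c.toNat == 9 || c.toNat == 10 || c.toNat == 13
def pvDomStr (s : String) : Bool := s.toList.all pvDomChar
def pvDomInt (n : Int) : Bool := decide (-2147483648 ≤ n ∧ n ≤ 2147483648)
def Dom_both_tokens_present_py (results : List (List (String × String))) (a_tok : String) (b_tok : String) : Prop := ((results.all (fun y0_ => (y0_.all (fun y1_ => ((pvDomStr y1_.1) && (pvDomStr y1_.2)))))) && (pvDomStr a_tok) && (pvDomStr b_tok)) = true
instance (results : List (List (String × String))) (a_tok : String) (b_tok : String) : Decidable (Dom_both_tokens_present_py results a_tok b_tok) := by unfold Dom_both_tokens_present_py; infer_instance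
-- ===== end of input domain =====

-- B replaces A's single loop carrying (saw_a, saw_b) flags with two independent any-scans joined by &&: simpler decomposition, same cost.

-- ===== PORT A =====
-- the lowered content of one result dict: (r.get("content") or "").lower()
-- ('or ""' maps a missing key to ""; present values are Strings, and "" or"d with "" is "")
def pvContent (r : List (String × String)) : String :=
  PySem.Str.lower ((PySem.Dict.mk r).getD "content" "")

-- the for-loop of A, carrying the saw_a/saw_b state, with the early return
def pvLoopA (al bl : String) : List (List (String × String)) → Bool → Bool → Bool
  | [], _, _ => false
  | r :: rs, saw_a, saw_b =>
    let c := pvContent r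
    let saw_a' := if PySem.Str.isIn al c then true else saw_a
    let saw_b' := if PySem.Str.isIn bl c then true else saw_b
    if saw_a' && saw_b' then true else pvLoopA al bl rs saw_a' saw_b'

def both_tokens_present_py (results : List (List (String × String))) (a_tok : String) (b_tok : String) : Bool :=
  let al := PySem.Str.lower a_tok
  let bl := PySem.Str.lower b_tok
  pvLoopA al bl results false false

-- ===== PORT B =====
def both_tokens_present_py_alt (results : List (List (String × String))) (a_tok : String) (b_tok : String) : Bool :=
  let al := PySem.Str.lower a_tok
  let bl := PySem.Str.lower b_tok
  results.any (fun r => PySem.Str.isIn al (pvContent r)) &&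
    results.any (fun r => PySem.Str.isIn bl (pvContent r))

-- ===== PRECONDITION & SPEC =====
def Spec_both_tokens_present_py (results : List (List (String × String))) (a_tok : String) (b_tok : String) (out : Bool) : Prop := out = both_tokens_present_py_alt results a_tok b_tok
instance (results : List (List (String × String))) (a_tok : String) (b_tok : String) (out : Bool) : Decidable (Spec_both_tokens_present_py results a_tok b_tok out) := by unfold Spec_both_tokens_present_py; infer_instance

-- ===== CLAIM (what is proved, stated in full; the proofs are below) =====
def Claim_equal_both_tokens_present_py : Prop := ∀ (results : List (List (String × String))) (a_tok : String) (b_tok : String), Dom_both_tokens_present_py results a_tok b_tok → Spec_both_tokens_present_py results a_tok b_tok (both_tokens_present_py results a_tok b_tok)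

-- ===== LEMMAS AND PROOFS =====
-- loop invariant: as long as not both flags are set, A's loop computes
-- (saw_a OR token a occurs ahead) AND (saw_b OR token b occurs ahead)
theorem pvLoopA_eq (al bl : String) (rs : List (List (String × String))) :
    ∀ sa sb : Bool, (sa && sb) = false →
      pvLoopA al bl rs sa sb =
        ((sa || rs.any (fun r => PySem.Str.isIn al (pvContent r))) &&
         (sb || rs.any (fun r => PySem.Str.isIn bl (pvContent r)))) := by
  induction rs with
  | nil => intro sa sb h; simp [pvLoopA, h]
  | cons r rs ih =>
    intro sa sb h
    simp only [pvLoopA, List.any_cons]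
    by_cases ha : PySem.Str.isIn al (pvContent r) <;>
      by_cases hb : PySem.Str.isIn bl (pvContent r) <;>
      cases sa <;> cases sb <;>
      simp_all [ih]

-- ===== VERDICT (by name: the statement is the Claim_ definition above) =====
theorem both_tokens_present_py_spec : Claim_equal_both_tokens_present_py := by
  intro results a_tok b_tok _
  unfold Spec_both_tokens_present_py both_tokens_present_py both_tokens_present_py_alt
  exact pvLoopA_eq _ _ results false false rfl
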